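-- pv_equiv track=rewrite | github.com/DavidJArnold/AdventOfCode | 2022/17/17.py | get_new_piece
-- ===== SOURCE A (Python) =====
-- def get_new_piece(index, max_height):
--     # creates the coordinates for a new piece
--     # index sets the type of piece, and
--     # max_height sets its initial position
--     if index % 5 == 0:
--         # ####
--         piece = []
--         for i in range(4):
--             piece.append((i + 2, max_height + 4))
--     elif index % 5 == 1:
--         #  #
--         # ###
--         #  #
--         piece = [(3, max_height + 6), (3, max_height + 4)]
--         for i in range(3):
--             piece.append((i + 2, max_height + 5))
--     elif index % 5 == 2:
--         #   #
--         #   #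
--         # ###
--         piece = [(4, max_height + 6), (4, max_height + 5)]
--         for i in range(3):
--             piece.append((i + 2, max_height + 4))
--     elif index % 5 == 3:
--         # #
--         # #
--         # #
--         # #
--         piece = [(2, max_height + 4 + i) for i in range(4)]
--     elif index % 5 == 4:
--         # ##
--         # ##
--         piece = []
--         for i in range(2):
--             for j in range(2):
--                 piece.append((2 + i, max_height + 4 + j))
--     return piece
-- ===== SOURCE B (Python) =====
-- # Single constant offset table (index%5 -> relative coordinates) plus one
-- # uniform translation pass, replacing the five-way if/elif with per-shape
-- # construction loops.  Objective: simpler.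
-- _SHAPES = {
--     0: [(2, 4), (3, 4), (4, 4), (5, 4)],
--     1: [(3, 6), (3, 4), (2, 5), (3, 5), (4, 5)],
--     2: [(4, 6), (4, 5), (2, 4), (3, 4), (4, 4)],
--     3: [(2, 4), (2, 5), (2, 6), (2, 7)],
--     4: [(2, 4), (2, 5), (3, 4), (3, 5)],
-- }
--
--
-- def get_new_piece(index, max_height):
--     return [(x, max_height + dy) for (x, dy) in _SHAPES[index % 5]]
-- ===== Notes on version B (the rewrite author's own statement) =====
-- stated objective: simpler
-- what changed: Replaced the five-way if/elif dispatch with per-branch construction loops by a single constant table of relative offsets keyed by index%5 and one uniform translation pass.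
import Mathlib
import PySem

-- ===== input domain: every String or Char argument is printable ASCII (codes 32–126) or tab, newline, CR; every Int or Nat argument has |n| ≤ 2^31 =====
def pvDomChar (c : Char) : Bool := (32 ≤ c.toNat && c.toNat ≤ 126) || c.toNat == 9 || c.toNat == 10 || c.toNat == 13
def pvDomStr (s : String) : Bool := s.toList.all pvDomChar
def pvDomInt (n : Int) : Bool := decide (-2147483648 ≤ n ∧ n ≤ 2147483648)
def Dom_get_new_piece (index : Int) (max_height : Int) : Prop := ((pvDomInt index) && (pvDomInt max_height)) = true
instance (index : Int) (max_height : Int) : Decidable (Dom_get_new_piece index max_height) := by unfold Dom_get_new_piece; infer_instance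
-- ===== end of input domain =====

-- B simplifies A: a constant table of relative offsets keyed by index%5 plus one
-- uniform translation pass, instead of five if/elif branches with construction loops.

-- ===== PORT A =====
def get_new_piece (index : Int) (max_height : Int) : List (Int × Int) :=
  if PySem.Int.mod index 5 = 0 then
    (PySem.List.pyRange 0 4 1).foldl
      (fun piece i => piece ++ [(i + 2, max_height + 4)]) []
  else if PySem.Int.mod index 5 = 1 then
    (PySem.List.pyRange 0 3 1).foldl
      (fun piece i => piece ++ [(i + 2, max_height + 5)])
      [(3, max_height + 6), (3, max_height + 4)]
  else if PySem.Int.mod index 5 = 2 then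
    (PySem.List.pyRange 0 3 1).foldl
      (fun piece i => piece ++ [(i + 2, max_height + 4)])
      [(4, max_height + 6), (4, max_height + 5)]
  else if PySem.Int.mod index 5 = 3 then
    (PySem.List.pyRange 0 4 1).map (fun i => ((2 : Int), max_height + 4 + i))
  else if PySem.Int.mod index 5 = 4 then
    (PySem.List.pyRange 0 2 1).foldl
      (fun piece i =>
        (PySem.List.pyRange 0 2 1).foldl
          (fun piece j => piece ++ [(2 + i, max_height + 4 + j)]) piece) []
  else []  -- unreachable: index % 5 ∈ {0,1,2,3,4}

-- ===== PORT B =====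
def pvShapes : PySem.Dict Int (List (Int × Int)) :=
  PySem.Dict.ofList
    [(0, [(2, 4), (3, 4), (4, 4), (5, 4)]),
     (1, [(3, 6), (3, 4), (2, 5), (3, 5), (4, 5)]),
     (2, [(4, 6), (4, 5), (2, 4), (3, 4), (4, 4)]),
     (3, [(2, 4), (2, 5), (2, 6), (2, 7)]),
     (4, [(2, 4), (2, 5), (3, 4), (3, 5)])]

def get_new_piece_alt (index : Int) (max_height : Int) : List (Int × Int) :=
  (PySem.Dict.getD pvShapes (PySem.Int.mod index 5) []).map
    (fun p => (p.1, max_height + p.2))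

-- ===== PRECONDITION & SPEC =====
def Spec_get_new_piece (index : Int) (max_height : Int) (out : List (Int × Int)) : Prop := out = get_new_piece_alt index max_height
instance (index : Int) (max_height : Int) (out : List (Int × Int)) : Decidable (Spec_get_new_piece index max_height out) := by unfold Spec_get_new_piece; infer_instance

-- ===== CLAIM (what is proved, stated in full; the proofs are below) =====
def Claim_equal_get_new_piece : Prop := ∀ (index : Int) (max_height : Int), Dom_get_new_piece index max_height → Spec_get_new_piece index max_height (get_new_piece index max_height)

-- ===== LEMMAS AND PROOFS =====

-- ===== VERDICT (by name: the statement is the Claim_ definition above) =====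
theorem get_new_piece_spec : Claim_equal_get_new_piece := by
  intro index max_height _
  unfold Spec_get_new_piece get_new_piece get_new_piece_alt
  rw [PySem.Int.mod_eq_emod_of_pos (by norm_num : (0:Int) < 5)]
  have h0 : 0 ≤ index % 5 := Int.emod_nonneg _ (by norm_num)
  have h5 : index % 5 < 5 := Int.emod_lt_of_pos _ (by norm_num)
  have h : index % 5 = 0 ∨ index % 5 = 1 ∨ index % 5 = 2 ∨
      index % 5 = 3 ∨ index % 5 = 4 := by omega
  rcases h with h | h | h | h | h <;>
    simp [h, pvShapes, PySem.Dict.getD, PySem.Dict.get?, PySem.Dict.ofList,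
      PySem.Dict.items, PySem.Dict.update, PySem.Dict.empty, PySem.Dict.insert,
      PySem.List.pyRange, List.range, List.range.loop] <;> omega
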